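-- pv_equiv track=rewrite | github.com/mfedorchuck/asciitree_script | tree_builder.py | build_structure
-- ===== SOURCE A (Python) =====
-- def find_last_branch(message_structure):
--     """Add the last branch index to the each field in dictionary with a tree structure.
--
--     Args:
--         message_structure: dictionary with order position as a key value and list with
--         word and it`s depth index as a value:
--         message_structure = {
--         key(int value): [word(str), depth index(int)]
--         ...
--         }
--     Returns:
--         message_structure: dictionary with last branch indexes for correct printing
--         the ascii-like tree.
--     """
--     word_depth = list(message_structure.values())
--     depth_list = [d[1] for d in word_depth]
--
--     for key in message_structure:
--         depth = message_structure[key][1]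
--         if depth > 1 and depth <= min(depth_list[key - 1:]):
--             message_structure[key] = (message_structure[key][0], message_structure[key][1], 1)
--         else:
--             message_structure[key] = (message_structure[key][0], message_structure[key][1], 0)
--
--     return message_structure
--
-- def build_structure(message):
--     """Build tree structures using characters from a string.
--
--     Args:
--         message: String with characters for building the structure like asciitree algorithm builds.
--     Returns:
--         structure_with_depth: dictionary with parameters for printing the ascii-like tree.
--     """
--     word = ''
--     full_depth = -1
--     space_depth = 0
--     dictionary = {}
--     struct_set = [' ', '(', ')']
--
--     for i, symbol in enumerate(message):
--         if symbol not in struct_set: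
--             word += symbol
--
--         elif symbol == ' ':
--             if word:
--                 dictionary[len(dictionary) + 1] = word, full_depth + space_depth
--
--             word = ''
--             space_depth = 1
--
--
--         elif symbol == '(':
--             if word:
--                 dictionary[len(dictionary) + 1] = word, full_depth + space_depth
--
--             word = ''
--             space_depth = 0
--             full_depth += 1
--
--         elif symbol == ')':
--             if word:
--                 dictionary[len(dictionary) + 1] = word, full_depth + space_depth
--
--             word = ''
--             space_depth = 0
--             full_depth -= 1
--
--     structure_with_depth = find_last_branch(dictionary)
--
--     return structure_with_depth
-- ===== SOURCE B (Python) =====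
-- def build_structure(message):
--     """Build tree structures using characters from a string.
--
--     Single tokenizing pass into a list, then one right-to-left suffix-minimum
--     sweep supplies the last-branch flags instead of a min() over each suffix.
--     """
--     tokens = []
--     word = ''
--     full_depth = -1
--     space_depth = 0
--     for ch in message:
--         if ch == ' ' or ch == '(' or ch == ')':
--             if word:
--                 tokens.append((word, full_depth + space_depth))
--             word = ''
--             if ch == ' ':
--                 space_depth = 1
--             elif ch == '(':
--                 space_depth = 0
--                 full_depth += 1
--             else:
--                 space_depth = 0
--                 full_depth -= 1
--         else:
--             word += ch
--
--     n = len(tokens)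
--     suffix_min = [0] * n
--     m = None
--     for j in range(n - 1, -1, -1):
--         d = tokens[j][1]
--         m = d if m is None or d < m else m
--         suffix_min[j] = m
--
--     result = {}
--     for j, (w, d) in enumerate(tokens):
--         result[j + 1] = (w, d, 1 if d > 1 and d <= suffix_min[j] else 0)
--     return result
-- ===== Notes on version B (the rewrite author's own statement) =====
-- stated objective: alternative
-- what changed: B tokenizes in one pass into a plain list, then computes the last-branch flags with a single right-to-left suffix-minimum sweep instead of calling min() over the remaining depth suffix for every token (intended as faster: asymptotically O(n) vs O(n + t^2) in the token count t, but a timing run read only 1.4x at the largest size, so no speed is claimed).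
import Mathlib
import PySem

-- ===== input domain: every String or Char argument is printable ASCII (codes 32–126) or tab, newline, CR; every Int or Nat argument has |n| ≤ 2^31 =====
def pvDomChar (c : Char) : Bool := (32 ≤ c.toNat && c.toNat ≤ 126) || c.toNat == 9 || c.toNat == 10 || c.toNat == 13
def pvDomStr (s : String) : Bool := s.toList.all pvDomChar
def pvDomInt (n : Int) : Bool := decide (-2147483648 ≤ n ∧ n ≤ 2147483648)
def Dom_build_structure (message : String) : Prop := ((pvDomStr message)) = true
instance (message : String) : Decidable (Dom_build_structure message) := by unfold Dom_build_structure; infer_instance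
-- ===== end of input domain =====

-- B tokenizes into a plain list and computes the last-branch flags with one right-to-left suffix-minimum sweep instead of a fresh min() over the depth suffix per token; return values are identical.

-- ===== PORT A =====
-- per-character step of A's tokenizing loop (state: word, full_depth, space_depth, dictionary)
def bsA_step (st : List Char × Int × Int × PySem.Dict Int (String × Int)) (c : Char) :
    List Char × Int × Int × PySem.Dict Int (String × Int) :=
  let (word, fd, sd, dict) := st
  if ¬ (c = ' ' ∨ c = '(' ∨ c = ')') then (word ++ [c], fd, sd, dict)
  else if c = ' ' then
    let dict := if word ≠ [] then dict.insert ((dict.size : Int) + 1) (String.ofList word, fd + sd) else dict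
    ([], fd, 1, dict)
  else if c = '(' then
    let dict := if word ≠ [] then dict.insert ((dict.size : Int) + 1) (String.ofList word, fd + sd) else dict
    ([], fd + 1, 0, dict)
  else
    let dict := if word ≠ [] then dict.insert ((dict.size : Int) + 1) (String.ofList word, fd + sd) else dict
    ([], fd - 1, 0, dict)

-- port of find_last_branch: updates every value of the dict in place; the returned dict is rendered as its items
def find_last_branch (ms : PySem.Dict Int (String × Int)) : List (Int × String × Int × Int) :=
  let word_depth := ms.values
  let depth_list := word_depth.map (fun d => d.2)
  ms.keys.map (fun key =>
    let v := ms.getD key ("", 0)    -- message_structure[key]; key ∈ keys, so never a KeyError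
    let depth := v.2
    match PySem.List.min? (PySem.List.slice depth_list (some (key - 1)) none) (fun x => x) with
    | some m => if 1 < depth ∧ depth ≤ m then (key, v.1, depth, 1) else (key, v.1, depth, 0)
    | none => (key, v.1, depth, 0))   -- unreachable here: the slice always contains depth itself

def build_structure (message : String) : List (Int × String × Int × Int) :=
  let st := message.toList.foldl bsA_step ([], -1, 0, PySem.Dict.empty)
  find_last_branch st.2.2.2

-- ===== PORT B =====
-- B's single tokenizing pass (state: word, full_depth, space_depth, token list)
def bsB_tok (st : List Char × Int × Int × List (String × Int)) (c : Char) :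
    List Char × Int × Int × List (String × Int) :=
  let (word, fd, sd, toks) := st
  if c = ' ' ∨ c = '(' ∨ c = ')' then
    let toks := if word ≠ [] then toks ++ [(String.ofList word, fd + sd)] else toks
    if c = ' ' then ([], fd, 1, toks)
    else if c = '(' then ([], fd + 1, 0, toks)
    else ([], fd - 1, 0, toks)
  else (word ++ [c], fd, sd, toks)

-- suffix minima of the token depths (B's right-to-left loop, as structural recursion)
def bsB_sufmin : List (String × Int) → List Int
  | [] => []
  | (_, d) :: rest =>
    match bsB_sufmin rest with
    | [] => [d]
    | m :: ms => (if d < m then d else m) :: m :: ms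

-- B's final enumeration pass: key j+1, flag from the precomputed suffix minimum
def bsB_emit (j : Int) : List ((String × Int) × Int) → List (Int × String × Int × Int)
  | [] => []
  | ((w, d), m) :: rest =>
    (j + 1, w, d, if 1 < d ∧ d ≤ m then 1 else 0) :: bsB_emit (j + 1) rest

def build_structure_alt (message : String) : List (Int × String × Int × Int) :=
  let st := message.toList.foldl bsB_tok ([], -1, 0, [])
  let toks := st.2.2.2
  bsB_emit 0 (toks.zip (bsB_sufmin toks))

-- ===== PRECONDITION & SPEC =====
def Spec_build_structure (message : String) (out : List (Int × String × Int × Int)) : Prop := out = build_structure_alt message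
instance (message : String) (out : List (Int × String × Int × Int)) : Decidable (Spec_build_structure message out) := by unfold Spec_build_structure; infer_instance

-- ===== CLAIM (what is proved, stated in full; the proofs are below) =====
def Claim_equal_build_structure : Prop := ∀ (message : String), Dom_build_structure message → Spec_build_structure message (build_structure message)

-- ===== LEMMAS AND PROOFS =====

theorem bsB_sufmin_length (l : List (String × Int)) : (bsB_sufmin l).length = l.length := by
  induction l with
  | nil => rfl
  | cons x rest ih =>
    obtain ⟨w, d⟩ := x
    simp only [bsB_sufmin]
    cases h : bsB_sufmin rest with
    | nil => simp [← ih, h]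
    | cons m ms => simp [← ih, h]

theorem bsB_sufmin_getElem? (l : List (String × Int)) (j : Nat) :
    (bsB_sufmin l)[j]? = PySem.List.min? ((l.drop j).map (fun p => p.2)) (fun x => x) := by
  induction l generalizing j with
  | nil => simp [bsB_sufmin, PySem.List.min?]
  | cons x rest ih =>
    obtain ⟨w, d⟩ := x
    cases j with
    | succ j =>
      simp only [bsB_sufmin, List.drop_succ_cons]
      cases h : bsB_sufmin rest with
      | nil =>
        have : rest = [] := by
          have := bsB_sufmin_length rest; rw [h] at this
          exact List.length_eq_zero_iff.mp this.symm
        subst this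
        simp [PySem.List.min?]
      | cons m ms =>
        have := ih (j := j); rw [h] at this
        simpa using this
    | zero =>
      simp only [bsB_sufmin, List.drop_zero, List.map_cons]
      rw [PySem.List.min?_id_cons]
      cases h : bsB_sufmin rest with
      | nil =>
        have : rest = [] := by
          have := bsB_sufmin_length rest; rw [h] at this
          exact List.length_eq_zero_iff.mp this.symm
        subst this
        rfl
      | cons m ms =>
        have h0 := ih (j := 0); rw [h] at h0
        simp only [List.drop_zero] at h0
        cases rest with
        | nil => simp [bsB_sufmin] at h
        | cons r rs =>
          simp only [List.map_cons] at h0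
          rw [PySem.List.min?_id_cons] at h0
          have hm : m = List.foldl min r.2 (rs.map (fun p => p.2)) := by
            simpa using h0
          simp only [List.getElem?_cons_zero, List.map_cons, List.foldl_cons]
          rw [List.foldl_assoc, ← hm]
          simp only [Option.some.injEq, min_def]
          split_ifs <;> omega

theorem bsB_emit_getElem? (l : List ((String × Int) × Int)) (j : Int) (k : Nat) :
    (bsB_emit j l)[k]? = l[k]?.map (fun p =>
      (j + (k : Int) + 1, p.1.1, p.1.2, if 1 < p.1.2 ∧ p.1.2 ≤ p.2 then (1 : Int) else 0)) := by
  induction l generalizing j k with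
  | nil => simp [bsB_emit]
  | cons x rest ih =>
    obtain ⟨⟨w, d⟩, m⟩ := x
    cases k with
    | zero => simp [bsB_emit]
    | succ k =>
      simp only [bsB_emit, List.getElem?_cons_succ]
      rw [ih]
      cases h : rest[k]? with
      | none => simp
      | some p =>
        simp only [Option.map_some]
        congr 2
        push_cast
        ring

-- tokenizer invariant: A's dict holds exactly B's tokens, numbered from 1
theorem tok_inv (l : List Char) (w : List Char) (fd sd : Int)
    (toks : List (String × Int)) (d : PySem.Dict Int (String × Int))
    (hd : d.items = PySem.List.enumerate toks 1) :
    (l.foldl bsA_step (w, fd, sd, d)).1 = (l.foldl bsB_tok (w, fd, sd, toks)).1 ∧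
    (l.foldl bsA_step (w, fd, sd, d)).2.1 = (l.foldl bsB_tok (w, fd, sd, toks)).2.1 ∧
    (l.foldl bsA_step (w, fd, sd, d)).2.2.1 = (l.foldl bsB_tok (w, fd, sd, toks)).2.2.1 ∧
    (l.foldl bsA_step (w, fd, sd, d)).2.2.2.items =
      PySem.List.enumerate (l.foldl bsB_tok (w, fd, sd, toks)).2.2.2 1 := by
  induction l generalizing w fd sd toks d with
  | nil => exact ⟨rfl, rfl, rfl, hd⟩
  | cons c cs ih =>
    have hflush : ∀ (v : String × Int),
        (d.insert ((d.size : Int) + 1) v).items = PySem.List.enumerate (toks ++ [v]) 1 := by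
      intro v
      have hsize : d.size = toks.length := by
        simp [PySem.Dict.size, hd, PySem.List.length_enumerate]
      have hnc : d.contains ((d.size : Int) + 1) = false := by
        rw [Bool.eq_false_iff]
        intro hc
        rw [PySem.Dict.contains_iff_mem_keys] at hc
        simp only [PySem.Dict.keys, hd, PySem.List.map_fst_enumerate] at hc
        rw [PySem.List.mem_pyRange_one] at hc
        omega
      rw [PySem.Dict.items_insert_of_not_contains d _ hnc, hd,
        PySem.List.enumerate_append, hsize]
      simp [PySem.List.enumerate_cons, PySem.List.enumerate_nil, add_comm]
    by_cases hc : c = ' ' ∨ c = '(' ∨ c = ')'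
    · have hA : bsA_step (w, fd, sd, d) c =
          (([] : List Char),
           if c = ' ' then fd else if c = '(' then fd + 1 else fd - 1,
           if c = ' ' then 1 else 0,
           if w ≠ [] then d.insert ((d.size : Int) + 1) (String.ofList w, fd + sd) else d) := by
        simp only [bsA_step, hc, not_true, if_false]
        rcases hc with h | h | h <;> subst h <;> simp
      have hB : bsB_tok (w, fd, sd, toks) c =
          (([] : List Char),
           if c = ' ' then fd else if c = '(' then fd + 1 else fd - 1,
           if c = ' ' then 1 else 0,
           if w ≠ [] then toks ++ [(String.ofList w, fd + sd)] else toks) := by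
        simp only [bsB_tok, hc, if_true]
        rcases hc with h | h | h <;> subst h <;> simp
      simp only [List.foldl_cons, hA, hB]
      apply ih
      by_cases hw : w = []
      · simp [hw, hd]
      · simp only [hw, ne_eq, not_false_iff, if_true]
        exact hflush _
    · have hA : bsA_step (w, fd, sd, d) c = (w ++ [c], fd, sd, d) := by
        simp [bsA_step, hc]
      have hB : bsB_tok (w, fd, sd, toks) c = (w ++ [c], fd, sd, toks) := by
        simp [bsB_tok, hc]
      simp only [List.foldl_cons, hA, hB]
      exact ih _ _ _ _ _ hd

theorem flb_eq (toks : List (String × Int)) (d : PySem.Dict Int (String × Int))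
    (hd : d.items = PySem.List.enumerate toks 1) :
    find_last_branch d = bsB_emit 0 (toks.zip (bsB_sufmin toks)) := by
  have hkeys : d.keys = PySem.List.pyRange 1 (1 + toks.length) 1 := by
    simp [PySem.Dict.keys, hd, PySem.List.map_fst_enumerate]
  have hvals : d.values = toks := by
    simp [PySem.Dict.values, hd, PySem.List.map_snd_enumerate]
  have hnodup : d.keys.Nodup := by rw [hkeys]; exact PySem.List.nodup_pyRange_one _ _
  apply List.ext_getElem?
  intro k
  simp only [find_last_branch, hkeys, hvals, List.getElem?_map,
    PySem.List.getElem?_pyRange_one]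
  rw [bsB_emit_getElem?]
  by_cases hk : k < toks.length
  · have hsl : k < (bsB_sufmin toks).length := by rw [bsB_sufmin_length]; exact hk
    have hlt : k < (1 + (toks.length : Int) - 1).toNat := by omega
    rw [if_pos hlt]
    have hz : (toks.zip (bsB_sufmin toks))[k]? = some (toks[k], (bsB_sufmin toks)[k]) := by
      rw [List.getElem?_eq_getElem (by simp [bsB_sufmin_length]; omega :
        k < (toks.zip (bsB_sufmin toks)).length)]
      simp [List.getElem_zip]
    rw [hz]
    simp only [Option.map_some]
    -- the dict lookup at key 1+k is token k
    have hmem : ((1 : Int) + (k : Int), toks[k]) ∈ d.items := by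
      rw [hd, PySem.List.mem_enumerate_iff]
      exact ⟨k, hk, rfl⟩
    have hget : d.getD ((1 : Int) + (k : Int)) ("", 0) = toks[k] :=
      PySem.Dict.getD_of_mem_items d hmem hnodup _
    -- the slice from key-1 is the depth suffix from k, whose min B precomputed
    have hslice : PySem.List.slice (toks.map (fun p => p.2)) (some ((1 : Int) + (k : Int) - 1)) none
        = (toks.drop k).map (fun p => p.2) := by
      rw [PySem.List.slice_from _ (by omega : (0:Int) ≤ 1 + (k : Int) - 1), List.map_drop]
      congr 1
      omega
    have hmin : PySem.List.min? ((toks.drop k).map (fun p => p.2)) (fun x => x)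
        = some ((bsB_sufmin toks)[k]) := by
      rw [← bsB_sufmin_getElem?]
      exact List.getElem?_eq_getElem hsl
    rw [hget, hslice, hmin]
    simp only [Option.some.injEq]
    split_ifs with hcond
    · exact Prod.ext (by push_cast; ring) rfl
    · exact Prod.ext (by push_cast; ring) rfl
  · have hlt : ¬ k < (1 + (toks.length : Int) - 1).toNat := by omega
    have hz : (toks.zip (bsB_sufmin toks))[k]? = none :=
      List.getElem?_eq_none (by simp [bsB_sufmin_length]; omega)
    rw [if_neg hlt, hz]
    rfl

-- ===== VERDICT (by name: the statement is the Claim_ definition above) =====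
theorem build_structure_spec : Claim_equal_build_structure := by
  intro message _
  unfold Spec_build_structure build_structure build_structure_alt
  have h := tok_inv message.toList [] (-1) 0 [] PySem.Dict.empty (by
    simp [PySem.Dict.empty, PySem.List.enumerate_nil])
  exact flb_eq _ _ h.2.2.2
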